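-- pv_equiv track=rewrite | github.com/noblejim/MACRO-DATA | scripts/compute_additional_windows.py | nearest_on_or_after
-- ===== SOURCE A (Python) =====
-- def nearest_on_or_after(dates, target):
--     # binary search
--     lo, hi = 0, len(dates) - 1
--     ans = None
--     while lo <= hi:
--         mid = (lo + hi) // 2
--         if dates[mid] >= target:
--             ans = dates[mid]
--             hi = mid - 1
--         else:
--             lo = mid + 1
--     return ans
-- ===== SOURCE B (Python) =====
-- def nearest_on_or_after(dates, target):
--     for d in dates:
--         if d >= target:
--             return d
--     return None
-- ===== Notes on version B (the rewrite author's own statement) =====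
-- stated objective: simpler
-- what changed: Replaces the lo/hi/mid binary-search loop by a single forward scan returning the first element >= target, correct because in the admitted inputs every element >= target follows all elements < target (in particular on every sorted list).
-- outside the precondition, e.g. on nearest_on_or_after([5, 1, 6], 2): A returns 6, B returns 5
import Mathlib
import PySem

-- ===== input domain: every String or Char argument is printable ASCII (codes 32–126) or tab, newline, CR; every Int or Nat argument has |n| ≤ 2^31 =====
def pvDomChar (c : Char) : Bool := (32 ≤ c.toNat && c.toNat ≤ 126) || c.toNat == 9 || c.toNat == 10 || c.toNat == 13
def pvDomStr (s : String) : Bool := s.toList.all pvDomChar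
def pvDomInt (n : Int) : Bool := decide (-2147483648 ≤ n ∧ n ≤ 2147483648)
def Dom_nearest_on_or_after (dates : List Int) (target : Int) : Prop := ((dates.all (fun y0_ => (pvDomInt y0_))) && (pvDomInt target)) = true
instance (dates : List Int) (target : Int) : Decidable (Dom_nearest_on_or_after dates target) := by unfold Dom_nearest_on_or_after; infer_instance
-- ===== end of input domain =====

-- B replaces A's binary search by a single forward scan for the first element >= target; objective: simpler (not faster).


-- ===== PORT A =====
-- the while loop of A, state (lo, hi, ans); dates[mid] via pyGet? (none = IndexError, unreachable from the initial state)
def nearestLoopA (dates : List Int) (target : Int) (lo hi : Int) (ans : Option Int) : Option Int :=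
  if h : lo ≤ hi then
    let mid := PySem.Int.floordiv (lo + hi) 2
    match PySem.List.pyGet? dates mid with
    | none => ans
    | some d =>
      if target ≤ d then nearestLoopA dates target lo (mid - 1) (some d)
      else nearestLoopA dates target (mid + 1) hi ans
  else ans
termination_by (hi + 1 - lo).toNat
decreasing_by
  all_goals
    have hb := PySem.Int.floordiv_two_mid_bounds h
    omega

def nearest_on_or_after (dates : List Int) (target : Int) : Option Int :=
  nearestLoopA dates target 0 ((dates.length : Int) - 1) none

-- ===== PORT B =====
def nearest_on_or_after_alt (dates : List Int) (target : Int) : Option Int :=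
  match dates with
  | [] => none
  | d :: rest => if target ≤ d then some d else nearest_on_or_after_alt rest target

-- ===== PRECONDITION & SPEC =====
-- Pre_ excludes lists in which some element < target occurs after an element >= target (only
-- possible when the list is unsorted, violating A's bisection assumption): there A's value is an
-- accident of the probe order that no linear scan need match. Every sorted list is admitted, and
-- so is any unsorted list whose elements >= target form a suffix.
def Pre_nearest_on_or_after (dates : List Int) (target : Int) : Prop :=
  List.Pairwise (fun a b => target ≤ a → target ≤ b) dates
instance (dates : List Int) (target : Int) : Decidable (Pre_nearest_on_or_after dates target) := by
  unfold Pre_nearest_on_or_after; infer_instance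

def pvWitness_nearest_on_or_after : List Int × Int := ([1, 3, 5], 4)

def Spec_nearest_on_or_after (dates : List Int) (target : Int) (out : Option Int) : Prop := out = nearest_on_or_after_alt dates target
instance (dates : List Int) (target : Int) (out : Option Int) : Decidable (Spec_nearest_on_or_after dates target out) := by unfold Spec_nearest_on_or_after; infer_instance

-- ===== CLAIM (what is proved, stated in full; the proofs are below) =====
def Claim_equal_nearest_on_or_after : Prop := ∀ (dates : List Int) (target : Int), Dom_nearest_on_or_after dates target → Pre_nearest_on_or_after dates target → Spec_nearest_on_or_after dates target (nearest_on_or_after dates target)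

-- ===== LEMMAS AND PROOFS =====

-- B's scan returns l[m]? once indices below m all fail the test and indices from m on all pass it
lemma scan_eq (target : Int) :
    ∀ (l : List Int) (m : Nat),
      (∀ (i : Nat) (h : i < l.length), i < m → ¬ target ≤ l[i]) →
      (∀ (i : Nat) (h : i < l.length), m ≤ i → target ≤ l[i]) →
      nearest_on_or_after_alt l target = l[m]? := by
  intro l
  induction l with
  | nil => intro m _ _; simp [nearest_on_or_after_alt]
  | cons d rest ih =>
    intro m hlt hge
    cases m with
    | zero =>
      have : target ≤ d := hge 0 (by simp) (Nat.zero_le _)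
      simp [nearest_on_or_after_alt, this]
    | succ m' =>
      have hd : ¬ target ≤ d := hlt 0 (by simp) (Nat.succ_pos _)
      simp only [nearest_on_or_after_alt, if_neg hd, List.getElem?_cons_succ]
      exact ih m' (fun i h hi => hlt (i + 1) (by simpa using h) (by omega))
        (fun i h hi => hge (i + 1) (by simpa using h) (by omega))

-- loop invariant for A's binary search on a sorted list
lemma loopA_eq (dates : List Int) (target : Int)
    (hs : List.Pairwise (fun a b => target ≤ a → target ≤ b) dates) :
    ∀ (n : Nat) (lo hi : Int) (ans : Option Int),
      (hi + 1 - lo).toNat ≤ n →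
      0 ≤ lo → lo ≤ hi + 1 → hi + 1 ≤ (dates.length : Int) →
      (∀ (i : Nat) (h : i < dates.length), (i : Int) < lo → ¬ target ≤ dates[i]) →
      (∀ (i : Nat) (h : i < dates.length), hi < (i : Int) → target ≤ dates[i]) →
      ans = dates[(hi + 1).toNat]? →
      nearestLoopA dates target lo hi ans = nearest_on_or_after_alt dates target := by
  have hpw := List.pairwise_iff_getElem.mp hs
  intro n
  induction n with
  | zero =>
    intro lo hi ans hfuel h0 hlh hlen hlt hgt hans
    have hdone : ¬ lo ≤ hi := by omega
    rw [nearestLoopA, dif_neg hdone, hans]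
    have hlo : lo = hi + 1 := by omega
    exact (scan_eq target dates (hi + 1).toNat
      (fun i h hi' => hlt i h (by omega))
      (fun i h hi' => hgt i h (by omega))).symm
  | succ n ih =>
    intro lo hi ans hfuel h0 hlh hlen hlt hgt hans
    by_cases hle : lo ≤ hi
    · rw [nearestLoopA, dif_pos hle]
      have hmid := PySem.Int.floordiv_two_mid_bounds hle
      set mid := PySem.Int.floordiv (lo + hi) 2 with hmiddef
      have hmidn : mid = ((mid.toNat : Nat) : Int) := by omega
      have hmlt : mid.toNat < dates.length := by omega
      have hget : PySem.List.pyGet? dates mid = some dates[mid.toNat] := by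
        conv_lhs => rw [hmidn]
        rw [PySem.List.pyGet?_natCast, List.getElem?_eq_getElem hmlt]
      simp only [hget]
      by_cases hcmp : target ≤ dates[mid.toNat]
      · simp only [if_pos hcmp]
        refine ih lo (mid - 1) (some dates[mid.toNat]) (by omega) h0 (by omega) (by omega)
          hlt ?_ ?_
        · intro i h hi'
          rcases lt_or_eq_of_le (show mid.toNat ≤ i by omega) with hlt' | heq
          · exact hpw mid.toNat i hmlt h hlt' hcmp
          · subst heq; exact hcmp
        · have : (mid - 1 + 1).toNat = mid.toNat := by omega
          rw [this, List.getElem?_eq_getElem hmlt]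
      · simp only [if_neg hcmp]
        refine ih (mid + 1) hi ans (by omega) (by omega) (by omega) hlen ?_ hgt hans
        intro i h hi'
        rcases lt_or_eq_of_le (show i ≤ mid.toNat by omega) with hlt' | heq
        · exact fun hc => hcmp (hpw i mid.toNat h hmlt hlt' hc)
        · subst heq; exact hcmp
    · rw [nearestLoopA, dif_neg hle, hans]
      exact (scan_eq target dates (hi + 1).toNat
        (fun i h hi' => hlt i h (by omega))
        (fun i h hi' => hgt i h (by omega))).symm

-- ===== VERDICT (by name: the statement is the Claim_ definition above) =====
theorem nearest_on_or_after_spec : Claim_equal_nearest_on_or_after := by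
  intro dates target _ hpre
  unfold Spec_nearest_on_or_after nearest_on_or_after
  refine loopA_eq dates target hpre dates.length 0 ((dates.length : Int) - 1) none
    (by omega) le_rfl (by omega) (by omega)
    (fun i h hi' => absurd hi' (by omega))
    (fun i h hi' => absurd h (by omega)) ?_
  have : ((dates.length : Int) - 1 + 1).toNat = dates.length := by omega
  rw [this, List.getElem?_eq_none le_rfl]
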